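-- pv_equiv track=rewrite | github.com/cda0345/tiktok_farm | providers/pexels.py | _choose_video_file
-- ===== SOURCE A (Python) =====
-- def _choose_video_file(video: dict) -> str | None:
--     """Pick a reasonable MP4 download URL from Pexels response."""
--     files = video.get("video_files") or []
--     if not isinstance(files, list) or not files:
--         return None
--
--     # Prefer vertical-ish and ~1080p, else best available
--     def score(f: dict) -> tuple[int, int]:
--         w = int(f.get("width") or 0)
--         h = int(f.get("height") or 0)
--         # Vertical preference: h>w gives a boost
--         vertical = 1 if h > w else 0
--         # Closer to 1080 width is better, penalize tiny
--         width_score = -abs(w - 1080)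
--         return (vertical, width_score)
--
--     files_sorted = sorted([f for f in files if isinstance(f, dict)], key=score, reverse=True)
--     for f in files_sorted:
--         link = f.get("link")
--         if isinstance(link, str) and link.startswith("http"):
--             return link
--     return None
-- ===== SOURCE B (Python) =====
-- def _choose_video_file(video: dict) -> str | None:
--     """Pick a reasonable MP4 download URL from Pexels response."""
--     files = video.get("video_files") or []
--     if not isinstance(files, list) or not files:
--         return None
--
--     def score(f: dict) -> tuple[int, int]:
--         w = int(f.get("width") or 0)
--         h = int(f.get("height") or 0)
--         return (1 if h > w else 0, -abs(w - 1080))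
--
--     # Single pass: keep the best-scoring valid link seen so far.
--     # Strict '>' keeps the earliest entry on score ties, matching the
--     # stable reverse sort of the original.
--     best_score = None
--     best_link = None
--     for f in files:
--         if not isinstance(f, dict):
--             continue
--         s = score(f)  # computed for every dict entry, like the original's sort key
--         link = f.get("link")
--         if isinstance(link, str) and link.startswith("http") and (best_score is None or s > best_score):
--             best_score = s
--             best_link = link
--     return best_link
-- ===== Notes on version B (the rewrite author's own statement) =====
-- stated objective: simpler
-- what changed: Replaces sorting the whole file list by score and scanning the sorted list for the first valid link with a single running-maximum pass that keeps the best-scoring valid link (strict '>' preserves the stable sort's earliest-wins tie-break).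
import Mathlib
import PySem

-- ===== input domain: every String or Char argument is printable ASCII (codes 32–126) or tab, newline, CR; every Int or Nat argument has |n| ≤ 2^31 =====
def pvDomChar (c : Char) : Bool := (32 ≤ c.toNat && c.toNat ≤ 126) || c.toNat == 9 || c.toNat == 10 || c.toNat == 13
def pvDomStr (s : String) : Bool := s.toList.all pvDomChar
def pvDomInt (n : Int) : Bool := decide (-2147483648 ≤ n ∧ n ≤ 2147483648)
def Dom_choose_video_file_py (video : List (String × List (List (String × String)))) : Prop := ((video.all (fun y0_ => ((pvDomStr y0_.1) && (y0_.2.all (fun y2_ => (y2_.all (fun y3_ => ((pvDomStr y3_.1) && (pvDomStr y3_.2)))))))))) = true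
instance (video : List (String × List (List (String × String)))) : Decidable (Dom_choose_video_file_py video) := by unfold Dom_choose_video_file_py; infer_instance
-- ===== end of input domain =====

-- B replaces A's sort-by-score-then-scan with a single running-maximum pass over the files (simpler, same results).


-- ===== PORT A =====
-- association-list lookup, Python dict.get (first match)
def pvGet {α : Type} (d : List (String × α)) (k : String) : Option α :=
  (d.find? (fun p => p.1 == k)).map (·.2)

-- int(f.get("width") or 0): missing or "" is falsy → 0; Pre_ guarantees the parse succeeds elsewhere,
-- so the .getD 0 fallback is never reached on admitted inputs (Python raises ValueError there).
def pvToInt (o : Option String) : Int :=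
  match o with
  | none => 0
  | some s => if s == "" then 0 else (PySem.Int.ofStr? s).getD 0

-- first component of score(f): 1 if h > w else 0
def pvVert (f : List (String × String)) : Int :=
  let w := pvToInt (pvGet f "width")
  let h := pvToInt (pvGet f "height")
  if h > w then 1 else 0

-- second component of score(f): -abs(w - 1080)
def pvWidthScore (f : List (String × String)) : Int :=
  let w := pvToInt (pvGet f "width");
  -(abs (w - 1080))

-- A's final loop: first entry of the sorted list with a str link starting with "http"
def pvFirstLink : List (List (String × String)) → Option String
  | [] => none
  | f :: rest =>
    match pvGet f "link" with
    | some link => if PySem.Str.startswith link "http" then some link else pvFirstLink rest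
    | none => pvFirstLink rest

-- the [f for f in files if isinstance(f, dict)] filter is vacuous under the typed domain (every entry is a dict)
def choose_video_file_py (video : List (String × List (List (String × String)))) : Option String :=
  let files := (pvGet video "video_files").getD []   -- video.get("video_files") or []
  if files.isEmpty then none
  else pvFirstLink (PySem.List.sorted2 files pvVert pvWidthScore true)

-- ===== PORT B =====
-- B's loop body: state = (best_score, best_link); Python tuple '>' written out componentwise (lexicographic)
def pvStepB (best : Option (Int × Int) × Option String) (f : List (String × String)) :
    Option (Int × Int) × Option String :=
  let s := (pvVert f, pvWidthScore f)   -- s = score(f), computed for every entry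
  match pvGet f "link" with
  | some link =>
    if PySem.Str.startswith link "http" &&
        (match best.1 with
         | none => true
         | some bs => decide (bs.1 < s.1) || (decide (bs.1 = s.1) && decide (bs.2 < s.2)))
    then (some s, some link) else best
  | none => best

def choose_video_file_py_alt (video : List (String × List (List (String × String)))) : Option String :=
  let files := (pvGet video "video_files").getD []
  if files.isEmpty then none
  else (files.foldl pvStepB (none, none)).2   -- return best_link

-- ===== PRECONDITION & SPEC =====
-- Pre_ excludes exactly the inputs on which Python raises ValueError: a file entry whose
-- "width"/"height" value is a non-empty string that int() cannot parse.
def pvNumOK (o : Option String) : Bool :=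
  match o with
  | none => true
  | some s => s == "" || (PySem.Int.ofStr? s).isSome

def Pre_choose_video_file_py (video : List (String × List (List (String × String)))) : Prop :=
  (((pvGet video "video_files").getD []).all
    (fun f => pvNumOK (pvGet f "width") && pvNumOK (pvGet f "height"))) = true

instance (video : List (String × List (List (String × String)))) : Decidable (Pre_choose_video_file_py video) := by
  unfold Pre_choose_video_file_py; infer_instance

def pvWitness_choose_video_file_py : (List (String × List (List (String × String)))) :=
  [("video_files", [[("width", "720"), ("height", "1280"), ("link", "http://v.example/a.mp4")],
                    [("width", "1080"), ("height", "608"), ("link", "http://v.example/b.mp4")]])]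

def Spec_choose_video_file_py (video : List (String × List (List (String × String)))) (out : Option String) : Prop := out = choose_video_file_py_alt video
instance (video : List (String × List (List (String × String)))) (out : Option String) : Decidable (Spec_choose_video_file_py video out) := by unfold Spec_choose_video_file_py; infer_instance

-- ===== CLAIM (what is proved, stated in full; the proofs are below) =====
def Claim_equal_choose_video_file_py : Prop := ∀ (video : List (String × List (List (String × String)))), Dom_choose_video_file_py video → Pre_choose_video_file_py video → Spec_choose_video_file_py video (choose_video_file_py video)

-- ===== LEMMAS AND PROOFS =====

-- the combined (vertical, width_score) sort key, as a lexicographically ordered pair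
def pvKey (f : List (String × String)) : Int ×ₗ Int := toLex (pvVert f, pvWidthScore f)

-- is this entry's link a str starting with "http"?
def pvValid (f : List (String × String)) : Bool :=
  match pvGet f "link" with
  | some link => PySem.Str.startswith link "http"
  | none => false

def pvLink (f : List (String × String)) : String := (pvGet f "link").getD ""

-- abstract form of B's step on the "best element so far"
def pvBestStep (b : Option (List (String × String))) (x : List (String × String)) :
    Option (List (String × String)) :=
  if pvValid x && (match b with | none => true | some g => decide (pvKey g < pvKey x))
  then some x else b

def pvEnc : Option (List (String × String)) → Option (Int × Int) × Option String
  | none => (none, none)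
  | some f => (some (pvVert f, pvWidthScore f), some (pvLink f))

theorem pvLexlt_bool' (a b c d : Int) :
    decide (toLex (a, b) < toLex (c, d)) = (decide (a < c) || (!decide (c < a) && decide (b < d))) := by
  apply Bool.eq_iff_iff.mpr
  simp only [decide_eq_true_eq, Bool.or_eq_true, Bool.and_eq_true, Bool.not_eq_true',
    decide_eq_false_iff_not, Prod.Lex.toLex_lt_toLex]
  omega

-- sorted2 with the two score components IS sorted with the lexicographic key
theorem pvSorted2_eq (l : List (List (String × String))) :
    PySem.List.sorted2 l pvVert pvWidthScore true = PySem.List.sorted l pvKey true := by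
  rw [PySem.List.sorted_rev_eq_foldl_insertBy]
  simp only [PySem.List.sorted2]
  congr 1
  funext acc x
  congr 1
  funext a b
  simp only [if_pos]
  rw [pvKey, pvKey]
  exact (pvLexlt_bool' _ _ _ _).symm

-- A's scan returns the link of the first valid entry
theorem pvFirstLink_eq (l : List (List (String × String))) :
    pvFirstLink l = (l.find? pvValid).map pvLink := by
  induction l with
  | nil => rfl
  | cons f rest ih =>
    cases h : pvGet f "link" with
    | none => simp [pvFirstLink, h, List.find?, pvValid, ih]
    | some link =>
      cases hC : PySem.Chars.startswith link.toList ['h', 't', 't', 'p'] <;>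
        simp [pvFirstLink, h, List.find?, pvValid, pvLink, PySem.Str.startswith, hC, ih]

-- inserting x into a descending-sorted list commutes find? with the best-so-far step
theorem pvInsert_find (x : List (String × String)) (s : List (List (String × String)))
    (hp : s.Pairwise (fun a b => pvKey b ≤ pvKey a)) :
    (PySem.List.insertBy (fun a b => decide (pvKey b < pvKey a)) x s).find? pvValid
      = pvBestStep (s.find? pvValid) x := by
  induction s with
  | nil =>
    by_cases hv : pvValid x = true <;>
      simp [PySem.List.insertBy, List.find?, pvBestStep, hv]
  | cons y ys ih =>
    have hyys : ∀ g ∈ ys, pvKey g ≤ pvKey y := by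
      intro g hg; exact (List.pairwise_cons.mp hp).1 g hg
    have hptail : ys.Pairwise (fun a b => pvKey b ≤ pvKey a) := (List.pairwise_cons.mp hp).2
    by_cases hxy : pvKey y < pvKey x
    · -- x goes in front
      have hins : PySem.List.insertBy (fun a b => decide (pvKey b < pvKey a)) x (y :: ys)
          = x :: y :: ys := by simp [PySem.List.insertBy, hxy]
      rw [hins]
      by_cases hv : pvValid x = true
      · -- LHS = some x; the best among y :: ys has key ≤ key y < key x
        rw [List.find?]
        cases hfind : (y :: ys).find? pvValid with
        | none => simp [pvBestStep, hv]
        | some g =>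
          have hg : g ∈ y :: ys := List.mem_of_find?_eq_some hfind
          have hgle : pvKey g ≤ pvKey y := by
            rcases List.mem_cons.mp hg with h | h
            · exact le_of_eq (by rw [h])
            · exact hyys g h
          simp [pvBestStep, hv, lt_of_le_of_lt hgle hxy]
      · have hv' : pvValid x = false := by simpa using hv
        simp [List.find?, hv', pvBestStep]
    · have hins : PySem.List.insertBy (fun a b => decide (pvKey b < pvKey a)) x (y :: ys)
          = y :: PySem.List.insertBy (fun a b => decide (pvKey b < pvKey a)) x ys := by
        simp [PySem.List.insertBy, hxy]
      rw [hins]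
      by_cases hvy : pvValid y = true
      · simp [List.find?, hvy, pvBestStep, hxy]
      · have hvy' : pvValid y = false := by simpa using hvy
        simp [List.find?, hvy', ih hptail]

-- first valid entry of the reverse-sorted list = running best over the original order
theorem pvSorted_find_eq (l : List (List (String × String))) :
    (PySem.List.sorted l pvKey true).find? pvValid = l.foldl pvBestStep none := by
  induction l using List.reverseRecOn with
  | nil => rfl
  | append_singleton l x ih =>
    have h1 : PySem.List.sorted (l ++ [x]) pvKey true
        = PySem.List.insertBy (fun a b => decide (pvKey b < pvKey a)) x
            (PySem.List.sorted l pvKey true) := by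
      rw [PySem.List.sorted_rev_eq_foldl_insertBy, PySem.List.sorted_rev_eq_foldl_insertBy,
        List.foldl_append, List.foldl_cons, List.foldl_nil]
    rw [h1, pvInsert_find x _ (PySem.List.sorted_pairwise_rev l pvKey), ih,
      List.foldl_append, List.foldl_cons, List.foldl_nil]

-- B's concrete fold is the encoding of the abstract best-so-far fold
theorem pvFoldB_eq (l : List (List (String × String))) (b : Option (List (String × String))) :
    l.foldl pvStepB (pvEnc b) = pvEnc (l.foldl pvBestStep b) := by
  induction l generalizing b with
  | nil => rfl
  | cons x t ih =>
    have hstep : pvStepB (pvEnc b) x = pvEnc (pvBestStep b x) := by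
      cases hl : pvGet x "link" with
      | none =>
        have hv : pvValid x = false := by simp [pvValid, hl]
        cases b <;> simp [pvStepB, pvEnc, pvBestStep, hl, hv]
      | some link =>
        have hlk : pvLink x = link := by simp [pvLink, hl]
        cases hC : PySem.Chars.startswith link.toList ['h', 't', 't', 'p'] with
        | false =>
          cases b <;>
            simp [pvStepB, pvEnc, pvBestStep, pvValid, hl, PySem.Str.startswith, hC]
        | true =>
          cases b with
          | none =>
            simp [pvStepB, pvEnc, pvBestStep, pvValid, hl, PySem.Str.startswith, hC, hlk]
          | some g =>
            have hiff : (pvVert g < pvVert x ∨ (pvVert g = pvVert x ∧ pvWidthScore g < pvWidthScore x))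
                ↔ pvKey g < pvKey x := by
              rw [pvKey, pvKey, Prod.Lex.toLex_lt_toLex]
            by_cases hk : pvKey g < pvKey x <;>
              simp [pvStepB, pvEnc, pvBestStep, pvValid, hl, PySem.Str.startswith, hC, hlk,
                hiff, hk]
    rw [List.foldl_cons, List.foldl_cons, hstep, ih]

-- ===== VERDICT (by name: the statement is the Claim_ definition above) =====
theorem choose_video_file_py_spec : Claim_equal_choose_video_file_py := by
  intro video _ _
  unfold Spec_choose_video_file_py
  simp only [choose_video_file_py, choose_video_file_py_alt]
  by_cases hE : ((pvGet video "video_files").getD []).isEmpty = true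
  · simp [hE]
  · rw [if_neg hE, if_neg hE, pvSorted2_eq, pvFirstLink_eq, pvSorted_find_eq,
      show ((pvGet video "video_files").getD []).foldl pvStepB (none, none)
        = pvEnc (((pvGet video "video_files").getD []).foldl pvBestStep none) from
        pvFoldB_eq _ none]
    cases ((pvGet video "video_files").getD []).foldl pvBestStep none <;> simp [pvEnc]
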